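-- pv_equiv track=rewrite | github.com/heiszodd/ZTbot | engine/correlation_guard.py | get_correlated_pairs
-- ===== SOURCE A (Python) =====
-- CORRELATION_GROUPS = {
--     "crypto_majors": ["BTCUSDT", "ETHUSDT", "BNBUSDT", "SOLUSDT", "AVAXUSDT", "ADAUSDT"],
--     "btc_correlated": ["BTCUSDT", "ETHUSDT"],
--     "gold": ["XAUUSD", "XAGUSD"],
-- }
--
-- def get_correlated_pairs(pair: str) -> list:
--     correlated = []
--     for _, pairs in CORRELATION_GROUPS.items():
--         if pair in pairs:
--             for p in pairs:
--                 if p != pair and p not in correlated: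
--                     correlated.append(p)
--     return correlated
-- ===== SOURCE B (Python) =====
-- CORRELATION_GROUPS = {
--     "crypto_majors": ["BTCUSDT", "ETHUSDT", "BNBUSDT", "SOLUSDT", "AVAXUSDT", "ADAUSDT"],
--     "btc_correlated": ["BTCUSDT", "ETHUSDT"],
--     "gold": ["XAUUSD", "XAGUSD"],
-- }
--
-- # Precomputed inverted index: symbol -> its correlated symbols, built once at import.
-- _CORRELATED_INDEX = {}
-- for _pairs in CORRELATION_GROUPS.values():
--     for _p in _pairs:
--         _bucket = _CORRELATED_INDEX.setdefault(_p, {})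
--         for _q in _pairs:
--             if _q != _p:
--                 _bucket[_q] = None
--
-- def get_correlated_pairs(pair: str) -> list:
--     return list(_CORRELATED_INDEX.get(pair, {}))
-- ===== Notes on version B (the rewrite author's own statement) =====
-- stated objective: alternative
-- what changed: B builds an inverted index (symbol -> correlated symbols) once at module import and answers each call with a single dict lookup, instead of A's per-call scan over all groups with an incremental membership-checked append.
import Mathlib
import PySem

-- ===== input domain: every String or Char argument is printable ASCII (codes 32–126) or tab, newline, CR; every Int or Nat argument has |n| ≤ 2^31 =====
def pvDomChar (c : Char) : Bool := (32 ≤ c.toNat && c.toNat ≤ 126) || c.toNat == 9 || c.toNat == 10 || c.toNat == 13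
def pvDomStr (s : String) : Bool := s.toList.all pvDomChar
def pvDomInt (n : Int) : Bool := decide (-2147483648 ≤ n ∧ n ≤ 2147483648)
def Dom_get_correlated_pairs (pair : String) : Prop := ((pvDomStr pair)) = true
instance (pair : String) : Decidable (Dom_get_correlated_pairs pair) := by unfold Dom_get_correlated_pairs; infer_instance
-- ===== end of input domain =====

-- B precomputes an inverted index (symbol -> correlated symbols) once at import, so each call
-- is a single dict lookup instead of A's per-call scan over all groups.

-- the module constant CORRELATION_GROUPS, as an insertion-ordered association list
def pvGroups : List (String × List String) :=
  [("crypto_majors", ["BTCUSDT", "ETHUSDT", "BNBUSDT", "SOLUSDT", "AVAXUSDT", "ADAUSDT"]),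
   ("btc_correlated", ["BTCUSDT", "ETHUSDT"]),
   ("gold", ["XAUUSD", "XAGUSD"])]

-- ===== PORT A =====
def get_correlated_pairs (pair : String) : List String :=
  pvGroups.foldl (fun correlated kv =>
    if pair ∈ kv.2 then
      kv.2.foldl (fun c p => if p ≠ pair ∧ p ∉ c then c ++ [p] else c) correlated
    else correlated) []

-- ===== PORT B =====
-- _CORRELATED_INDEX of Source B: built once by iterating the groups; each bucket is a dict with
-- value None (Option Unit = none), mirroring `_bucket[_q] = None`; setdefault = getD + re-insert
-- (overwrite keeps position, a fresh key appends — exactly Python's setdefault result).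
def pvIndex : PySem.Dict String (PySem.Dict String (Option Unit)) :=
  pvGroups.foldl (fun (idx : PySem.Dict String (PySem.Dict String (Option Unit))) kv =>
    kv.2.foldl (fun idx p =>
      let bucket := idx.getD p PySem.Dict.empty
      let bucket := kv.2.foldl (fun b q => if q ≠ p then b.insert q none else b) bucket
      idx.insert p bucket) idx) PySem.Dict.empty

-- list(_CORRELATED_INDEX.get(pair, {})) = the keys of the bucket, in insertion order
def get_correlated_pairs_alt (pair : String) : List String :=
  (pvIndex.getD pair PySem.Dict.empty).keys

-- ===== PRECONDITION & SPEC =====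
def Spec_get_correlated_pairs (pair : String) (out : List String) : Prop := out = get_correlated_pairs_alt pair
instance (pair : String) (out : List String) : Decidable (Spec_get_correlated_pairs pair out) := by unfold Spec_get_correlated_pairs; infer_instance

-- ===== CLAIM (what is proved, stated in full; the proofs are below) =====
def Claim_equal_get_correlated_pairs : Prop := ∀ (pair : String), Dom_get_correlated_pairs pair → Spec_get_correlated_pairs pair (get_correlated_pairs pair)

-- ===== LEMMAS AND PROOFS =====

-- the keys of the precomputed index are exactly the symbols occurring in the constant
theorem pv_keys : pvIndex.keys =
    ["BTCUSDT","ETHUSDT","BNBUSDT","SOLUSDT","AVAXUSDT","ADAUSDT","XAUUSD","XAGUSD"] := by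
  decide

-- outside the table both sides return []
theorem pv_cases (pair : String)
    (h1 : pair ≠ "BTCUSDT") (h2 : pair ≠ "ETHUSDT") (h3 : pair ≠ "BNBUSDT")
    (h4 : pair ≠ "SOLUSDT") (h5 : pair ≠ "AVAXUSDT") (h6 : pair ≠ "ADAUSDT")
    (h7 : pair ≠ "XAUUSD") (h8 : pair ≠ "XAGUSD") :
    get_correlated_pairs pair = get_correlated_pairs_alt pair := by
  have hc : pvIndex.contains pair = false := by
    rw [PySem.Dict.contains_eq_decide_mem_keys, pv_keys]
    simp [h1, h2, h3, h4, h5, h6, h7, h8]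
  have hb : get_correlated_pairs_alt pair = [] := by
    unfold get_correlated_pairs_alt
    rw [PySem.Dict.getD_of_not_contains (h := hc)]
    exact PySem.Dict.keys_empty
  have ha : get_correlated_pairs pair = [] := by
    simp [get_correlated_pairs, pvGroups, h1, h2, h3, h4, h5, h6, h7, h8]
  rw [ha, hb]

-- ===== VERDICT (by name: the statement is the Claim_ definition above) =====
theorem get_correlated_pairs_spec : Claim_equal_get_correlated_pairs := by
  intro pair _
  show get_correlated_pairs pair = get_correlated_pairs_alt pair
  by_cases h1 : pair = "BTCUSDT"; · subst h1; decide
  by_cases h2 : pair = "ETHUSDT"; · subst h2; decide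
  by_cases h3 : pair = "BNBUSDT"; · subst h3; decide
  by_cases h4 : pair = "SOLUSDT"; · subst h4; decide
  by_cases h5 : pair = "AVAXUSDT"; · subst h5; decide
  by_cases h6 : pair = "ADAUSDT"; · subst h6; decide
  by_cases h7 : pair = "XAUUSD"; · subst h7; decide
  by_cases h8 : pair = "XAGUSD"; · subst h8; decide
  exact pv_cases pair h1 h2 h3 h4 h5 h6 h7 h8
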